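-- pv_equiv track=rewrite | github.com/Dev130/gfg_problems | potd_21June25.py | catchThieves
-- ===== SOURCE A (Python) =====
-- def catchThieves(arr, k):
--     police = []
--     thief = []
--     count = 0
--
--     for i in range(len(arr)):
--         if arr[i] == 'P':
--             police.append(i)
--         elif arr[i] == 'T':
--             thief.append(i)
--
--     # Match police and thieves
--     while police and thief:
--         if abs(police[0] - thief[0]) <= k:
--             count += 1
--             police.pop(0)
--             thief.pop(0)
--         elif police[0] < thief[0]:
--             police.pop(0)
--         else:
--             thief.pop(0)
--
--     return count
-- ===== SOURCE B (Python) =====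
-- def catchThieves(arr, k):
--     # One pass with a single queue of unmatched indices (all of one kind),
--     # advanced by a head pointer instead of pop(0).
--     count = 0
--     pending = []   # indices appended in increasing order; pending[head:] is live
--     head = 0
--     kind = ''
--     for i, c in enumerate(arr):
--         if c != 'P' and c != 'T':
--             continue
--         if head < len(pending) and kind != c:
--             while head < len(pending) and i - pending[head] > k:
--                 head += 1
--             if head < len(pending):
--                 head += 1
--                 count += 1
--             else:
--                 pending = [i]
--                 head = 0
--                 kind = c
--         else:
--             pending.append(i)
--             kind = c
--     return count
-- ===== Notes on version B (the rewrite author's own statement) =====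
-- stated objective: alternative
-- what changed: Replaces A's build-two-lists-then-repeatedly-pop(0) matching with a single left-to-right pass that keeps one head-pointer queue of unmatched indices (at any moment all unmatched people are of one kind), matching or discarding stale fronts as each element arrives.
import Mathlib
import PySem

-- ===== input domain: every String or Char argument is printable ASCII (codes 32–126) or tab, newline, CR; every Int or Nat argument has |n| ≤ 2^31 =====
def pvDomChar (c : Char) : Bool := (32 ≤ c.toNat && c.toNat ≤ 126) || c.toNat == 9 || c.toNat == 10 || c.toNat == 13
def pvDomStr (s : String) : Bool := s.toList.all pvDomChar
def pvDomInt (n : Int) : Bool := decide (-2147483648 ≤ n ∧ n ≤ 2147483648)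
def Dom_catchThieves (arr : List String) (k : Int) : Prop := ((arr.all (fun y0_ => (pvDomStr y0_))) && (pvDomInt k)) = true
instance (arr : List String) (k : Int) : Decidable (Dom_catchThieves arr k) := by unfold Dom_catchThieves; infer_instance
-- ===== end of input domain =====

-- B replaces A's build-two-lists-then-repeatedly-pop(0) matching with a single left-to-right
-- pass over the array keeping one head-pointer queue of unmatched indices (alternative algorithm).

-- ===== PORT A =====
-- the 'while police and thief' loop of A, state (police, thief, count)
def loopA (k : Int) : List Int → List Int → Int → Int
  | p :: ps, t :: ts, count =>
      if |p - t| ≤ k then loopA k ps ts (count + 1)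
      else if p < t then loopA k ps (t :: ts) count
      else loopA k (p :: ps) ts count
  | [], _, count => count
  | _ :: _, [], count => count
termination_by ps ts _ => ps.length + ts.length

def catchThieves (arr : List String) (k : Int) : Int :=
  let pt := (PySem.List.pyRange 0 (PySem.List.len arr) 1).foldl
    (fun (pt : List Int × List Int) i =>
      if PySem.List.pyGetD arr i "" = "P" then (pt.1 ++ [i], pt.2)
      else if PySem.List.pyGetD arr i "" = "T" then (pt.1, pt.2 ++ [i])
      else pt) ([], [])
  loopA k pt.1 pt.2 0

-- ===== PORT B =====
-- the inner 'while head < len(pending) and i - pending[head] > k: head += 1'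
def advanceB (pending : List Int) (i k : Int) (head : Int) : Int :=
  if h : head < PySem.List.len pending ∧ k < i - PySem.List.pyGetD pending head 0 then
    advanceB pending i k (head + 1)
  else head
termination_by (PySem.List.len pending - head).toNat
decreasing_by
  simp only [PySem.List.len_eq] at h ⊢; omega

-- one iteration of B's for-loop, state (count, pending, head, kind)
def stepB (k : Int) (st : Int × List Int × Int × String) (e : Int × String) :
    Int × List Int × Int × String :=
  let (count, pending, head, kind) := st
  let (i, c) := e
  if c ≠ "P" ∧ c ≠ "T" then (count, pending, head, kind)
  else if head < PySem.List.len pending ∧ kind ≠ c then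
    let head' := advanceB pending i k head
    if head' < PySem.List.len pending then (count + 1, pending, head' + 1, kind)
    else (count, [i], 0, c)
  else (count, pending ++ [i], head, c)

def catchThieves_alt (arr : List String) (k : Int) : Int :=
  ((PySem.List.enumerate arr 0).foldl (stepB k) (0, [], 0, "")).1

-- ===== PRECONDITION & SPEC =====
def Spec_catchThieves (arr : List String) (k : Int) (out : Int) : Prop := out = catchThieves_alt arr k
instance (arr : List String) (k : Int) (out : Int) : Decidable (Spec_catchThieves arr k out) := by unfold Spec_catchThieves; infer_instance

-- ===== CLAIM (what is proved, stated in full; the proofs are below) =====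
def Claim_equal_catchThieves : Prop := ∀ (arr : List String) (k : Int), Dom_catchThieves arr k → Spec_catchThieves arr k (catchThieves arr k)

-- ===== LEMMAS AND PROOFS =====

-- indices of the 'P' / 'T' events of an enumerated list
def polOf (E : List (Int × String)) : List Int := (E.filter (fun e => e.2 == "P")).map (·.1)
def thiOf (E : List (Int × String)) : List Int := (E.filter (fun e => e.2 == "T")).map (·.1)

-- what B's state denotes on the A side, by the kind of the queued indices
def rhsB (k : Int) (kind : String) (Q ps ts : List Int) : Int :=
  if kind = "P" then loopA k (Q ++ ps) ts 0
  else if kind = "T" then loopA k ps (Q ++ ts) 0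
  else loopA k ps ts 0

lemma loopA_nil_left (k : Int) (ts : List Int) (c : Int) : loopA k [] ts c = c := by
  rw [loopA]

lemma loopA_nil_right (k : Int) (ps : List Int) (c : Int) : loopA k ps [] c = c := by
  cases ps <;> rw [loopA]

lemma loopA_acc_aux (k : Int) :
    ∀ (n : Nat) (ps ts : List Int), ps.length + ts.length ≤ n → ∀ c,
      loopA k ps ts c = c + loopA k ps ts 0 := by
  intro n
  induction n with
  | zero =>
    intro ps ts h c
    cases ps with
    | nil => simp [loopA_nil_left]
    | cons p ps => simp at h
  | succ n ih =>
    intro ps ts h c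
    match ps, ts with
    | [], ts => simp [loopA_nil_left]
    | p :: ps, [] => simp [loopA_nil_right]
    | p :: ps, t :: ts =>
      simp only [List.length_cons] at h
      rw [loopA, loopA]
      split_ifs with h1 h2
      · rw [ih ps ts (by omega) (c + 1), ih ps ts (by omega) (0 + 1)]; ring
      · rw [ih ps (t :: ts) (by simp only [List.length_cons]; omega) c]
      · rw [ih (p :: ps) ts (by simp only [List.length_cons]; omega) c]

lemma loopA_acc (k : Int) (ps ts : List Int) (c : Int) :
    loopA k ps ts c = c + loopA k ps ts 0 :=
  loopA_acc_aux k (ps.length + ts.length) ps ts le_rfl c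

-- drop a stale police front
lemma loopA_stale_left (k q i : Int) (ps ts : List Int) (c : Int)
    (hqi : q < i) (hk : k < i - q) :
    loopA k (q :: ps) (i :: ts) c = loopA k ps (i :: ts) c := by
  rw [loopA]
  rw [if_neg (by rw [abs_sub_comm, abs_of_pos (by omega)]; omega), if_pos hqi]

-- drop a stale thief front
lemma loopA_stale_right (k q i : Int) (ps ts : List Int) (c : Int)
    (hqi : q < i) (hk : k < i - q) :
    loopA k (i :: ps) (q :: ts) c = loopA k (i :: ps) ts c := by
  rw [loopA]
  rw [if_neg (by rw [abs_of_pos (by omega)]; omega), if_neg (by omega)]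

lemma loopA_match (k p t : Int) (ps ts : List Int) (c : Int) (h : |p - t| ≤ k) :
    loopA k (p :: ps) (t :: ts) c = loopA k ps ts (c + 1) := by
  rw [loopA, if_pos h]

lemma loopA_dropStale_left (k i : Int) (ps ts : List Int) (c : Int) :
    ∀ Q : List Int, (∀ q ∈ Q, q < i) →
    loopA k (Q ++ ps) (i :: ts) c
      = loopA k (Q.dropWhile (fun q => decide (k < i - q)) ++ ps) (i :: ts) c := by
  intro Q
  induction Q with
  | nil => intro _; rfl
  | cons q Q ih =>
    intro hlt
    by_cases hq : k < i - q
    · rw [List.cons_append, loopA_stale_left k q i _ _ c (hlt q (by simp)) hq,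
        ih (fun x hx => hlt x (by simp [hx])), List.dropWhile_cons_of_pos (by simpa using hq)]
    · rw [List.dropWhile_cons_of_neg (by simpa using hq)]

lemma loopA_dropStale_right (k i : Int) (ps ts : List Int) (c : Int) :
    ∀ Q : List Int, (∀ q ∈ Q, q < i) →
    loopA k (i :: ps) (Q ++ ts) c
      = loopA k (i :: ps) (Q.dropWhile (fun q => decide (k < i - q)) ++ ts) c := by
  intro Q
  induction Q with
  | nil => intro _; rfl
  | cons q Q ih =>
    intro hlt
    by_cases hq : k < i - q
    · rw [List.cons_append, loopA_stale_right k q i _ _ c (hlt q (by simp)) hq,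
        ih (fun x hx => hlt x (by simp [hx])), List.dropWhile_cons_of_pos (by simpa using hq)]
    · rw [List.dropWhile_cons_of_neg (by simpa using hq)]

-- advanceB advances the head pointer exactly over the stale prefix of the live queue
lemma advanceB_spec (pending : List Int) (i k : Int) :
    ∀ head : Int, 0 ≤ head → head.toNat ≤ pending.length →
      0 ≤ advanceB pending i k head ∧
      (advanceB pending i k head).toNat ≤ pending.length ∧
      pending.drop (advanceB pending i k head).toNat
        = (pending.drop head.toNat).dropWhile (fun q => decide (k < i - q)) := by
  suffices H : ∀ (m : Nat) (head : Int), pending.length - head.toNat ≤ m →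
      0 ≤ head → head.toNat ≤ pending.length →
      0 ≤ advanceB pending i k head ∧
      (advanceB pending i k head).toNat ≤ pending.length ∧
      pending.drop (advanceB pending i k head).toNat
        = (pending.drop head.toNat).dropWhile (fun q => decide (k < i - q)) by
    exact fun head h0 h1 => H pending.length head (by omega) h0 h1
  intro m
  induction m with
  | zero =>
    intro head hm h0 h1
    have hge : head.toNat = pending.length := by omega
    rw [advanceB, dif_neg (by simp [PySem.List.len_eq]; omega)]
    refine ⟨h0, h1, ?_⟩
    rw [List.drop_eq_nil_of_le (by omega)]
    simp
  | succ m ih =>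
    intro head hm h0 h1
    rw [advanceB]
    by_cases hc : head < PySem.List.len pending ∧ k < i - PySem.List.pyGetD pending head 0
    · rw [dif_pos hc]
      have hlt : head.toNat < pending.length := by
        have := hc.1; simp [PySem.List.len_eq] at this; omega
      have hrec := ih (head + 1) (by omega) (by omega) (by omega)
      refine ⟨hrec.1, hrec.2.1, ?_⟩
      rw [hrec.2.2]
      have hget : PySem.List.pyGetD pending head 0 = pending[head.toNat] :=
        PySem.List.pyGetD_eq_getElem pending 0 h0 (by simpa [PySem.List.len_eq] using hc.1)
      have hdrop : pending.drop head.toNat = pending[head.toNat] :: pending.drop (head.toNat + 1) :=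
        (List.getElem_cons_drop hlt).symm
      rw [hdrop, List.dropWhile_cons_of_pos (by simp [← hget]; exact hc.2)]
      have h2 : (head + 1).toNat = head.toNat + 1 := by omega
      rw [h2]
    · rw [dif_neg hc]
      refine ⟨h0, h1, ?_⟩
      by_cases hend : head.toNat = pending.length
      · rw [List.drop_eq_nil_of_le (by omega)]; simp
      · have hlt : head.toNat < pending.length := by omega
        have hnotp : ¬ k < i - PySem.List.pyGetD pending head 0 := by
          intro hp
          exact hc ⟨by simp [PySem.List.len_eq]; omega, hp⟩
        have hget : PySem.List.pyGetD pending head 0 = pending[head.toNat] :=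
          PySem.List.pyGetD_eq_getElem pending 0 h0 (by omega)
        rw [List.getElem_cons_drop hlt |>.symm,
          List.dropWhile_cons_of_neg (by simp [← hget]; omega)]

-- A's build loop collects exactly polOf/thiOf
lemma build_eq (E : List (Int × String)) :
    ∀ pc tc : List Int,
      E.foldl (fun (pt : List Int × List Int) (e : Int × String) =>
        if e.2 = "P" then (pt.1 ++ [e.1], pt.2)
        else if e.2 = "T" then (pt.1, pt.2 ++ [e.1]) else pt) (pc, tc)
      = (pc ++ polOf E, tc ++ thiOf E) := by
  induction E with
  | nil => intro pc tc; simp [polOf, thiOf]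
  | cons e E ih =>
    intro pc tc
    by_cases hP : e.2 = "P"
    · simp [polOf, thiOf, hP, ih]
    · by_cases hT : e.2 = "T" <;> simp [polOf, thiOf, hP, hT, ih]

lemma polOf_cons (i : Int) (c : String) (E : List (Int × String)) :
    polOf ((i, c) :: E) = if c = "P" then i :: polOf E else polOf E := by
  by_cases h : c = "P" <;> simp [polOf, h]

lemma thiOf_cons (i : Int) (c : String) (E : List (Int × String)) :
    thiOf ((i, c) :: E) = if c = "T" then i :: thiOf E else thiOf E := by
  by_cases h : c = "T" <;> simp [thiOf, h]

lemma rhsB_P (k : Int) (Q ps ts : List Int) : rhsB k "P" Q ps ts = loopA k (Q ++ ps) ts 0 := by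
  simp [rhsB]

lemma rhsB_T (k : Int) (Q ps ts : List Int) : rhsB k "T" Q ps ts = loopA k ps (Q ++ ts) 0 := by
  simp [rhsB]

-- the main invariant of B's single pass
lemma stepB_main (k : Int) :
    ∀ (E : List (Int × String)) (count : Int) (pending : List Int) (head : Int) (kind : String),
      0 ≤ head → head.toNat ≤ pending.length →
      E.Pairwise (fun a b => a.1 < b.1) →
      (∀ q ∈ pending.drop head.toNat, ∀ e ∈ E, q < e.1) →
      (pending.drop head.toNat = [] ∨ kind = "P" ∨ kind = "T") →
      (E.foldl (stepB k) (count, pending, head, kind)).1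
        = count + rhsB k kind (pending.drop head.toNat) (polOf E) (thiOf E) := by
  intro E
  induction E with
  | nil =>
    intro count pending head kind h0 h1 hpw hQ hkind
    have hz : rhsB k kind (pending.drop head.toNat) (polOf []) (thiOf []) = 0 := by
      simp only [polOf, thiOf, List.filter_nil, List.map_nil, rhsB]
      split_ifs <;> simp [loopA_nil_left, loopA_nil_right]
    show count = count + rhsB k kind (pending.drop head.toNat) (polOf []) (thiOf [])
    rw [hz, add_zero]
  | cons e E ih =>
    obtain ⟨i, c⟩ := e
    intro count pending head kind h0 h1 hpw hQ hkind
    have hpw' : E.Pairwise (fun a b => a.1 < b.1) := (List.pairwise_cons.mp hpw).2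
    have hiE : ∀ e ∈ E, i < e.1 := (List.pairwise_cons.mp hpw).1
    rw [List.foldl_cons]
    by_cases hskip : c ≠ "P" ∧ c ≠ "T"
    · have hstep : stepB k (count, pending, head, kind) (i, c) = (count, pending, head, kind) := by
        simp only [stepB]; rw [if_pos hskip]
      rw [hstep,
        ih count pending head kind h0 h1 hpw'
          (fun q hq e he => hQ q hq e (List.mem_cons_of_mem _ he)) hkind,
        polOf_cons, thiOf_cons, if_neg hskip.1, if_neg hskip.2]
    · have hPT : c = "P" ∨ c = "T" := by
        by_cases h : c = "P"
        · exact Or.inl h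
        · exact Or.inr (by tauto)
      by_cases hb : head < PySem.List.len pending ∧ kind ≠ c
      · -- match attempt branch
        have hlt : head.toNat < pending.length := by
          have := hb.1; simp only [PySem.List.len_eq] at this; omega
        have hne : pending.drop head.toNat ≠ [] := by
          intro h; rw [List.drop_eq_nil_iff] at h; omega
        obtain ⟨ha0, ha1, hadrop⟩ := advanceB_spec pending i k head h0 h1
        have hstep : stepB k (count, pending, head, kind) (i, c) =
            if advanceB pending i k head < PySem.List.len pending then
              (count + 1, pending, advanceB pending i k head + 1, kind)
            else (count, [i], 0, c) := by
          simp only [stepB]; rw [if_neg hskip, if_pos hb]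
        have hQlt : ∀ q ∈ pending.drop head.toNat, q < i :=
          fun q hq => hQ q hq (i, c) (List.mem_cons_self)
        -- the A-side value with the stale prefix dropped
        rcases hPT with hcP | hcT
        · -- c = "P": the queue holds thieves
          have hkT : kind = "T" := by
            rcases hkind with h | h | h
            · exact absurd h hne
            · exact absurd (h.trans hcP.symm) hb.2
            · exact h
          have hrhs : rhsB k kind (pending.drop head.toNat) (polOf ((i, c) :: E)) (thiOf ((i, c) :: E))
              = loopA k (i :: polOf E)
                  ((pending.drop head.toNat).dropWhile (fun q => decide (k < i - q)) ++ thiOf E) 0 := by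
            rw [hkT, polOf_cons, thiOf_cons, if_pos hcP, if_neg (by rw [hcP]; decide), rhsB_T]
            exact loopA_dropStale_right k i (polOf E) (thiOf E) 0 _ hQlt
          rw [hstep]
          by_cases hh : advanceB pending i k head < PySem.List.len pending
          · rw [if_pos hh]
            have hlt' : (advanceB pending i k head).toNat < pending.length := by
              simp only [PySem.List.len_eq] at hh; omega
            set h' := advanceB pending i k head with hh'
            have hdrop2 : pending.drop h'.toNat
                = pending[h'.toNat] :: pending.drop (h'.toNat + 1) :=
              (List.getElem_cons_drop hlt').symm
            set q := pending[h'.toNat] with hq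
            set rest := pending.drop (h'.toNat + 1) with hrest
            have hQ2 : q :: rest = (pending.drop head.toNat).dropWhile (fun q => decide (k < i - q)) := by
              rw [← hdrop2, hadrop]
            have hmemQ : ∀ x ∈ q :: rest, x ∈ pending.drop head.toNat := by
              intro x hx
              exact ((List.dropWhile_sublist _).subset) (hQ2 ▸ hx)
            have hqi : q < i := hQlt q (hmemQ q (List.mem_cons_self))
            have hqk : ¬ k < i - q := by
              have hne2 : (pending.drop head.toNat).dropWhile (fun q => decide (k < i - q)) ≠ [] := by
                rw [← hQ2]; simp
              simpa [← hQ2] using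
                List.head_dropWhile_not (fun q => decide (k < i - q)) hne2
            have hnext := ih (count + 1) pending (h' + 1) kind (by omega)
              (by omega) hpw'
              (fun x hx e he => by
                have hx' : x ∈ rest := by rw [show (h' + 1).toNat = h'.toNat + 1 by omega] at hx; exact hx
                exact hQ x (hmemQ x (List.mem_cons_of_mem _ hx')) e (List.mem_cons_of_mem _ he))
              (Or.inr (Or.inr hkT))
            rw [hnext, hrhs, ← hQ2, List.cons_append,
              loopA_match k i q _ _ 0 (by rw [abs_of_pos (by omega)]; omega),
              loopA_acc k _ _ (0 + 1),
              show (h' + 1).toNat = h'.toNat + 1 by omega, ← hrest, hkT, rhsB_T]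
            ring
          · rw [if_neg hh]
            have hnil : (pending.drop head.toNat).dropWhile (fun q => decide (k < i - q)) = [] := by
              rw [← hadrop, List.drop_eq_nil_of_le (by simp only [PySem.List.len_eq] at hh; omega)]
            have hnext := ih count [i] 0 c (by omega) (by simp) hpw'
              (fun x hx e he => by
                simp at hx; rw [hx]; exact hiE e he)
              (Or.inr (Or.inl hcP))
            rw [hnext, hrhs, hnil, List.nil_append, hcP]
            simp only [Int.toNat_zero, List.drop_zero]
            rw [rhsB_P, List.singleton_append]
        · -- c = "T": the queue holds police
          have hkP : kind = "P" := by
            rcases hkind with h | h | h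
            · exact absurd h hne
            · exact h
            · exact absurd (h.trans hcT.symm) hb.2
          have hrhs : rhsB k kind (pending.drop head.toNat) (polOf ((i, c) :: E)) (thiOf ((i, c) :: E))
              = loopA k
                  ((pending.drop head.toNat).dropWhile (fun q => decide (k < i - q)) ++ polOf E)
                  (i :: thiOf E) 0 := by
            rw [hkP, polOf_cons, thiOf_cons, if_neg (by rw [hcT]; decide), if_pos hcT, rhsB_P]
            exact loopA_dropStale_left k i (polOf E) (thiOf E) 0 _ hQlt
          rw [hstep]
          by_cases hh : advanceB pending i k head < PySem.List.len pending
          · rw [if_pos hh]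
            have hlt' : (advanceB pending i k head).toNat < pending.length := by
              simp only [PySem.List.len_eq] at hh; omega
            set h' := advanceB pending i k head with hh'
            have hdrop2 : pending.drop h'.toNat
                = pending[h'.toNat] :: pending.drop (h'.toNat + 1) :=
              (List.getElem_cons_drop hlt').symm
            set q := pending[h'.toNat] with hq
            set rest := pending.drop (h'.toNat + 1) with hrest
            have hQ2 : q :: rest = (pending.drop head.toNat).dropWhile (fun q => decide (k < i - q)) := by
              rw [← hdrop2, hadrop]
            have hmemQ : ∀ x ∈ q :: rest, x ∈ pending.drop head.toNat := by
              intro x hx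
              exact ((List.dropWhile_sublist _).subset) (hQ2 ▸ hx)
            have hqi : q < i := hQlt q (hmemQ q (List.mem_cons_self))
            have hqk : ¬ k < i - q := by
              have hne2 : (pending.drop head.toNat).dropWhile (fun q => decide (k < i - q)) ≠ [] := by
                rw [← hQ2]; simp
              simpa [← hQ2] using
                List.head_dropWhile_not (fun q => decide (k < i - q)) hne2
            have hnext := ih (count + 1) pending (h' + 1) kind (by omega)
              (by omega) hpw'
              (fun x hx e he => by
                have hx' : x ∈ rest := by rw [show (h' + 1).toNat = h'.toNat + 1 by omega] at hx; exact hx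
                exact hQ x (hmemQ x (List.mem_cons_of_mem _ hx')) e (List.mem_cons_of_mem _ he))
              (Or.inr (Or.inl hkP))
            rw [hnext, hrhs, ← hQ2, List.cons_append,
              loopA_match k q i _ _ 0 (by rw [abs_sub_comm, abs_of_pos (by omega)]; omega),
              loopA_acc k _ _ (0 + 1),
              show (h' + 1).toNat = h'.toNat + 1 by omega, ← hrest, hkP, rhsB_P]
            ring
          · rw [if_neg hh]
            have hnil : (pending.drop head.toNat).dropWhile (fun q => decide (k < i - q)) = [] := by
              rw [← hadrop, List.drop_eq_nil_of_le (by simp only [PySem.List.len_eq] at hh; omega)]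
            have hnext := ih count [i] 0 c (by omega) (by simp) hpw'
              (fun x hx e he => by
                simp at hx; rw [hx]; exact hiE e he)
              (Or.inr (Or.inr hcT))
            rw [hnext, hrhs, hnil, List.nil_append, hcT]
            simp only [Int.toNat_zero, List.drop_zero]
            rw [rhsB_T, List.singleton_append]
      · -- append branch
        have hstep : stepB k (count, pending, head, kind) (i, c) =
            (count, pending ++ [i], head, c) := by
          simp only [stepB]; rw [if_neg hskip, if_neg hb]
        have hdrop : (pending ++ [i]).drop head.toNat = pending.drop head.toNat ++ [i] :=
          List.drop_append_of_le_length h1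
        have hnext := ih count (pending ++ [i]) head c h0
          (by simp; omega) hpw'
          (fun x hx e he => by
            rw [hdrop] at hx
            rcases List.mem_append.mp hx with hx | hx
            · exact hQ x hx e (List.mem_cons_of_mem _ he)
            · simp at hx; rw [hx]; exact hiE e he)
          (by rcases hPT with h | h
              · exact Or.inr (Or.inl h)
              · exact Or.inr (Or.inr h))
        rw [hstep, hnext, hdrop]
        -- the two sides of the bookkeeping agree
        congr 1
        have hsplit : pending.drop head.toNat = [] ∨ kind = c := by
          by_cases hl : head < PySem.List.len pending
          · right
            by_contra hkc
            exact hb ⟨hl, hkc⟩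
          · left
            rw [List.drop_eq_nil_iff]
            simp only [PySem.List.len_eq] at hl; omega
        rcases hPT with hcP | hcT
        · rw [polOf_cons, thiOf_cons, if_pos hcP, if_neg (by rw [hcP]; decide)]
          rcases hsplit with hl | hl
          · rw [hl, List.nil_append, hcP, rhsB_P, List.singleton_append]
            simp only [rhsB]
            split_ifs <;> simp
          · rw [hl, hcP, rhsB_P, rhsB_P, List.append_assoc, List.singleton_append]
        · rw [polOf_cons, thiOf_cons, if_neg (by rw [hcT]; decide), if_pos hcT]
          rcases hsplit with hl | hl
          · rw [hl, List.nil_append, hcT, rhsB_T, List.singleton_append]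
            simp only [rhsB]
            split_ifs <;> simp
          · rw [hl, hcT, rhsB_T, rhsB_T, List.append_assoc, List.singleton_append]

lemma catchThieves_eq_loopA (arr : List String) (k : Int) :
    catchThieves arr k
      = loopA k (polOf (PySem.List.enumerate arr 0)) (thiOf (PySem.List.enumerate arr 0)) 0 := by
  unfold catchThieves
  have hbridge :
      (PySem.List.pyRange 0 (PySem.List.len arr) 1).foldl
        (fun (pt : List Int × List Int) i =>
          if PySem.List.pyGetD arr i "" = "P" then (pt.1 ++ [i], pt.2)
          else if PySem.List.pyGetD arr i "" = "T" then (pt.1, pt.2 ++ [i])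
          else pt) ([], [])
      = (PySem.List.enumerate arr 0).foldl
        (fun (pt : List Int × List Int) (e : Int × String) =>
          if e.2 = "P" then (pt.1 ++ [e.1], pt.2)
          else if e.2 = "T" then (pt.1, pt.2 ++ [e.1]) else pt) ([], []) := by
    rw [PySem.List.enumerate_eq_map_pyRange (d := ""), List.foldl_map]
  rw [hbridge, build_eq]
  simp

-- ===== VERDICT (by name: the statement is the Claim_ definition above) =====
theorem catchThieves_spec : Claim_equal_catchThieves := by
  intro arr k _
  unfold Spec_catchThieves catchThieves_alt
  have h := stepB_main k (PySem.List.enumerate arr 0) 0 [] 0 ""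
    le_rfl (by simp) (PySem.List.pairwise_lt_enumerate arr 0) (by simp) (by simp)
  rw [h, catchThieves_eq_loopA]
  simp [rhsB]
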